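-- pv_equiv track=rewrite | github.com/bradwyatt/Chess | Chess.py | snap_to_grid
-- ===== SOURCE A (Python) =====
-- def snap_to_grid(pos, x_range, y_range):
--     best_num_X, best_num_Y = x_range[0], y_range[0] #So Y doesn't go above the menu
--     for x in range(x_range[0], x_range[1], x_range[2]):
--         if pos[0]-x <= 48 and pos[0]-x >= 0:
--             best_num_X = x
--     for y in range(y_range[0], y_range[1], y_range[2]):
--         if pos[1]-y <= 48 and pos[1]-y >= 0:
--             best_num_Y = y
--     best_grid_snap = (best_num_X, best_num_Y)
--     return best_grid_snap
-- ===== SOURCE B (Python) =====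
-- # Closed-form grid snap: per axis, compute the last matching range element by
-- # floor division instead of scanning the whole range.
-- def _snap_axis(p, rng):
--     start, stop, step = rng
--     n = max(0, -((start - stop) // step))          # len(range(start, stop, step))
--     if step > 0:
--         k = min((p - start) // step, n - 1)        # largest index with value <= p
--     else:
--         k = min((p - 48 - start) // step, n - 1)   # largest index with value >= p-48
--     x = start + k * step
--     if k >= 0 and 0 <= p - x <= 48:
--         return x
--     return start
--
-- def snap_to_grid(pos, x_range, y_range):
--     return (_snap_axis(pos[0], x_range), _snap_axis(pos[1], y_range))
-- ===== Notes on version B (the rewrite author's own statement) =====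
-- stated objective: faster
-- what changed: Both per-axis scans over range(start,stop,step) are replaced by a closed-form floor-division computation of the last matching grid value (index clamped into the range), so no iteration remains.
import Mathlib
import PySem

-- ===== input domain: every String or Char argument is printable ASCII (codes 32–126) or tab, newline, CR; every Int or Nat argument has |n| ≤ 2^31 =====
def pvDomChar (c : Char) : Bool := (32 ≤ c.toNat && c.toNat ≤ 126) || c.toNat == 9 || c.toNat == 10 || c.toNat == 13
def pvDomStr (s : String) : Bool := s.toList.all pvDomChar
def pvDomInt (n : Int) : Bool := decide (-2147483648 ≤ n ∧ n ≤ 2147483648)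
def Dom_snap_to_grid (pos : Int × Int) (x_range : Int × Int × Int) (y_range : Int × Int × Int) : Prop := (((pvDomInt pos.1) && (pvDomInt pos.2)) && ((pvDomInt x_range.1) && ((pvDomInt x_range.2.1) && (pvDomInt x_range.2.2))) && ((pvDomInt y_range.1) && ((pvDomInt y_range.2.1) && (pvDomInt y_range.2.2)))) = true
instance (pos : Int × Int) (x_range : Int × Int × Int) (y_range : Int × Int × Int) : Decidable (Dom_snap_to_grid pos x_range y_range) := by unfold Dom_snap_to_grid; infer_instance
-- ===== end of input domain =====

-- B replaces each per-axis scan over the range by a closed-form floor-division computation (O(1) per axis).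

-- ===== PORT A =====
-- for x in range(...): if pos[0]-x <= 48 and pos[0]-x >= 0: best = x
def snap_to_grid (pos : Int × Int) (x_range : Int × Int × Int) (y_range : Int × Int × Int) : Int × Int :=
  let best_num_X :=
    (PySem.List.pyRange x_range.1 x_range.2.1 x_range.2.2).foldl
      (fun b x => if pos.1 - x ≤ 48 ∧ 0 ≤ pos.1 - x then x else b) x_range.1
  let best_num_Y :=
    (PySem.List.pyRange y_range.1 y_range.2.1 y_range.2.2).foldl
      (fun b y => if pos.2 - y ≤ 48 ∧ 0 ≤ pos.2 - y then y else b) y_range.1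
  (best_num_X, best_num_Y)

-- ===== PORT B =====
-- closed form: last matching index k = min(band bound, n-1), clamped; validity checked once
def snapAxis (p : Int) (rng : Int × Int × Int) : Int :=
  let start := rng.1
  let stop := rng.2.1
  let step := rng.2.2
  let n := max 0 (-(PySem.Int.floordiv (start - stop) step))
  let k := min (if 0 < step then PySem.Int.floordiv (p - start) step
                else PySem.Int.floordiv (p - 48 - start) step) (n - 1)
  let x := start + k * step
  if 0 ≤ k ∧ 0 ≤ p - x ∧ p - x ≤ 48 then x else start

def snap_to_grid_alt (pos : Int × Int) (x_range : Int × Int × Int) (y_range : Int × Int × Int) : Int × Int :=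
  (snapAxis pos.1 x_range, snapAxis pos.2 y_range)

-- ===== PRECONDITION & SPEC =====
-- Pre_ excludes a zero step on either axis: Python's range raises ValueError there (and B divides by the step).
def Pre_snap_to_grid (pos : Int × Int) (x_range : Int × Int × Int) (y_range : Int × Int × Int) : Prop :=
  x_range.2.2 ≠ 0 ∧ y_range.2.2 ≠ 0
instance (pos : Int × Int) (x_range : Int × Int × Int) (y_range : Int × Int × Int) : Decidable (Pre_snap_to_grid pos x_range y_range) := by unfold Pre_snap_to_grid; infer_instance

def pvWitness_snap_to_grid : (Int × Int) × (Int × Int × Int) × (Int × Int × Int) := ((50, 50), (0, 100, 16), (0, 100, 16))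

def Spec_snap_to_grid (pos : Int × Int) (x_range : Int × Int × Int) (y_range : Int × Int × Int) (out : Int × Int) : Prop := out = snap_to_grid_alt pos x_range y_range
instance (pos : Int × Int) (x_range : Int × Int × Int) (y_range : Int × Int × Int) (out : Int × Int) : Decidable (Spec_snap_to_grid pos x_range y_range out) := by unfold Spec_snap_to_grid; infer_instance

-- ===== CLAIM (what is proved, stated in full; the proofs are below) =====
def Claim_equal_snap_to_grid : Prop := ∀ (pos : Int × Int) (x_range : Int × Int × Int) (y_range : Int × Int × Int), Dom_snap_to_grid pos x_range y_range → Pre_snap_to_grid pos x_range y_range → Spec_snap_to_grid pos x_range y_range (snap_to_grid pos x_range y_range)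

-- ===== LEMMAS AND PROOFS =====

-- last-match fold over (List.range n).map f: no index matches → init
lemma fold_last_none (p : Int) (f : Nat → Int) (init : Int) (n : Nat)
    (h : ∀ k, k < n → ¬ (p - f k ≤ 48 ∧ 0 ≤ p - f k)) :
    ((List.range n).map f).foldl (fun b x => if p - x ≤ 48 ∧ 0 ≤ p - x then x else b) init = init := by
  induction n with
  | zero => simp
  | succ m ih =>
    rw [List.range_succ, List.map_append, List.foldl_append]
    simp only [List.map_cons, List.map_nil, List.foldl_cons, List.foldl_nil]
    rw [if_neg (h m (Nat.lt_succ_self m))]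
    exact ih (fun k hk => h k (Nat.lt_succ_of_lt hk))

-- last-match fold: j matches and nothing above j matches → f j
lemma fold_last_some (p : Int) (f : Nat → Int) (init : Int) (n : Nat) (j : Nat)
    (hj : j < n) (hc : p - f j ≤ 48 ∧ 0 ≤ p - f j)
    (habove : ∀ k, j < k → k < n → ¬ (p - f k ≤ 48 ∧ 0 ≤ p - f k)) :
    ((List.range n).map f).foldl (fun b x => if p - x ≤ 48 ∧ 0 ≤ p - x then x else b) init = f j := by
  induction n with
  | zero => omega
  | succ m ih =>
    rw [List.range_succ, List.map_append, List.foldl_append]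
    simp only [List.map_cons, List.map_nil, List.foldl_cons, List.foldl_nil]
    rcases Nat.lt_succ_iff_lt_or_eq.mp hj with hlt | rfl
    · rw [if_neg (habove m hlt (Nat.lt_succ_self m))]
      exact ih hlt (fun k h1 h2 => habove k h1 (Nat.lt_succ_of_lt h2))
    · rw [if_pos hc]

-- ceiling as negated floor division: max 0 (-(fdiv (-A) b)) equals the count formula, for 0 < b
lemma count_eq (A b : Int) (hb : 0 < b) :
    max 0 (-(PySem.Int.floordiv (-A) b)) = ((if 0 < A then ((A + b - 1) / b).toNat else 0 : Nat) : Int) := by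
  set q : Int := (A + b - 1) / b with hq
  have hfd : PySem.Int.floordiv (A + b - 1) b = q := PySem.Int.floordiv_eq_ediv_of_pos hb
  have hb2 := (PySem.Int.floordiv_eq_iff_of_pos hb).mp hfd
  have hceil : -(PySem.Int.floordiv (-A) b) = q := by
    rw [PySem.Int.neg_floordiv_neg_eq_iff_of_pos hb]
    constructor <;> nlinarith [hb2.1, hb2.2]
  rw [hceil]
  by_cases hA : 0 < A
  · have hqpos : 0 < q := by
      have := (PySem.Int.le_floordiv_iff_mul_le (a := A + b - 1) (q := 1) hb).mpr (by nlinarith)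
      rw [hfd] at this; omega
    simp [hA, Int.toNat_of_nonneg (le_of_lt hqpos), max_eq_right (le_of_lt hqpos)]
  · have hqnp : q ≤ 0 := by
      have := (PySem.Int.floordiv_lt_iff_lt_mul (a := A + b - 1) (q := 1) hb).mpr (by nlinarith)
      rw [hfd] at this; omega
    simp [hA, max_eq_left hqnp]

-- core per-axis equivalence
lemma axis_eq (p start stop step : Int) (hs : step ≠ 0) :
    (PySem.List.pyRange start stop step).foldl
      (fun b x => if p - x ≤ 48 ∧ 0 ≤ p - x then x else b) start
    = snapAxis p (start, stop, step) := by
  rcases lt_or_gt_of_ne hs with hneg | hpos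
  · -- negative step
    have hps : 0 < -step := by omega
    have hrange : PySem.List.pyRange start stop step =
        (List.range (if stop < start then ((start - stop + (-step) - 1) / (-step)).toNat else 0)).map
          (fun k : Nat => start + step * (k : Int)) := by
      unfold PySem.List.pyRange
      rw [if_neg hs, if_neg (by omega : ¬ 0 < step)]
    have hn : max 0 (-(PySem.Int.floordiv (start - stop) step)) =
        ((if stop < start then ((start - stop + (-step) - 1) / (-step)).toNat else 0 : Nat) : Int) := by
      rw [show PySem.Int.floordiv (start - stop) step
            = PySem.Int.floordiv (-(start - stop)) (-step) by
            rw [← PySem.Int.floordiv_neg_neg (start - stop) step]]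
      simpa [show (0 < start - stop) ↔ (stop < start) from by omega] using count_eq (start - stop) (-step) hps
    set cnt : Nat := if stop < start then ((start - stop + (-step) - 1) / (-step)).toNat else 0 with hcnt
    set khi : Int := PySem.Int.floordiv (p - 48 - start) step with hkhi
    have hkhi' : ∀ k : Int, k ≤ khi ↔ p - 48 ≤ start + step * k := by
      intro k
      rw [hkhi, show PySem.Int.floordiv (p - 48 - start) step
            = PySem.Int.floordiv (-(p - 48 - start)) (-step) by
            rw [← PySem.Int.floordiv_neg_neg (p - 48 - start) step],
          PySem.Int.le_floordiv_iff_mul_le hps]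
      constructor <;> intro h <;> nlinarith
    unfold snapAxis
    simp only [if_neg (by omega : ¬ 0 < step), hn, ← hkhi]
    set kB : Int := min khi ((cnt : Int) - 1) with hkB
    rw [hrange]
    by_cases hcond : 0 ≤ kB ∧ 0 ≤ p - (start + kB * step) ∧ p - (start + kB * step) ≤ 48
    · rw [if_pos hcond]
      have hjn : kB.toNat < cnt := by omega
      have hcast : (kB.toNat : Int) = kB := Int.toNat_of_nonneg hcond.1
      have := fold_last_some p (fun k : Nat => start + step * (k : Int)) start cnt kB.toNat hjn
        (by simp only [hcast]; constructor <;> nlinarith [hcond.2.1, hcond.2.2])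
        (by
          intro k h1 h2
          have hk1 : kB < (k : Int) := by omega
          have hk2 : (k : Int) ≤ (cnt : Int) - 1 := by omega
          have hkhigt : khi < (k : Int) := by omega
          have := (hkhi' (k : Int)).not.mp (by omega)
          intro hc; exact this (by nlinarith [hc.1]))
      rw [this]
      show start + step * (kB.toNat : Int) = start + kB * step
      rw [hcast]; ring
    · rw [if_neg hcond]
      apply fold_last_none
      intro k hk hc
      have hk2 : (k : Int) ≤ (cnt : Int) - 1 := by omega
      by_cases hkle : (k : Int) ≤ kB
      · -- f k ≥ f kB ≥ p - 48 fails only via f k > p; but f decreasing: f k ≤ f kB? no: step<0, k ≤ kB → f k ≥ f kB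
        -- kB ≥ k ≥ 0 so 0 ≤ kB; k ≤ khi so p-48 ≤ f k; failure of hcond must be p < f kB; then p < f kB ≤ f k
        have h0 : (0 : Int) ≤ kB := le_trans (by omega) hkle
        have hble : kB ≤ khi := min_le_left _ _
        have hfkB : p - 48 ≤ start + step * kB := (hkhi' kB).mp hble
        have hbad : p < start + kB * step := by
          by_contra hno
          exact hcond ⟨h0, by nlinarith, by nlinarith [hfkB]⟩
        have : start + step * kB ≤ start + step * (k : Int) := by nlinarith
        exact absurd hc.2 (by nlinarith [hbad])
      · have hkhigt : khi < (k : Int) := by omega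
        have := (hkhi' (k : Int)).not.mp (by omega)
        exact this (by nlinarith [hc.1])
  · -- positive step
    have hrange : PySem.List.pyRange start stop step =
        (List.range (if start < stop then ((stop - start + step - 1) / step).toNat else 0)).map
          (fun k : Nat => start + step * (k : Int)) := by
      unfold PySem.List.pyRange
      rw [if_neg hs, if_pos hpos]
    have hn : max 0 (-(PySem.Int.floordiv (start - stop) step)) =
        ((if start < stop then ((stop - start + step - 1) / step).toNat else 0 : Nat) : Int) := by
      rw [show start - stop = -(stop - start) by ring]
      simpa [show (0 < stop - start) ↔ (start < stop) from by omega] using count_eq (stop - start) step hpos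
    set cnt : Nat := if start < stop then ((stop - start + step - 1) / step).toNat else 0 with hcnt
    set khi : Int := PySem.Int.floordiv (p - start) step with hkhi
    have hkhi' : ∀ k : Int, k ≤ khi ↔ start + step * k ≤ p := by
      intro k
      rw [hkhi, PySem.Int.le_floordiv_iff_mul_le hpos]
      constructor <;> intro h <;> nlinarith
    unfold snapAxis
    simp only [if_pos hpos, hn, ← hkhi]
    set kB : Int := min khi ((cnt : Int) - 1) with hkB
    rw [hrange]
    by_cases hcond : 0 ≤ kB ∧ 0 ≤ p - (start + kB * step) ∧ p - (start + kB * step) ≤ 48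
    · rw [if_pos hcond]
      have hjn : kB.toNat < cnt := by omega
      have hcast : (kB.toNat : Int) = kB := Int.toNat_of_nonneg hcond.1
      have := fold_last_some p (fun k : Nat => start + step * (k : Int)) start cnt kB.toNat hjn
        (by simp only [hcast]; constructor <;> nlinarith [hcond.2.1, hcond.2.2])
        (by
          intro k h1 h2
          have hk1 : kB < (k : Int) := by omega
          have hk2 : (k : Int) ≤ (cnt : Int) - 1 := by omega
          have hkhigt : khi < (k : Int) := by omega
          have := (hkhi' (k : Int)).not.mp (by omega)
          intro hc; exact this (by nlinarith [hc.2]))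
      rw [this]
      show start + step * (kB.toNat : Int) = start + kB * step
      rw [hcast]; ring
    · rw [if_neg hcond]
      apply fold_last_none
      intro k hk hc
      have hk2 : (k : Int) ≤ (cnt : Int) - 1 := by omega
      by_cases hkle : (k : Int) ≤ kB
      · have h0 : (0 : Int) ≤ kB := le_trans (by omega) hkle
        have hble : kB ≤ khi := min_le_left _ _
        have hfkB : start + step * kB ≤ p := (hkhi' kB).mp hble
        have hbad : start + kB * step < p - 48 := by
          by_contra hno
          exact hcond ⟨h0, by nlinarith [hfkB], by nlinarith⟩
        have : start + step * (k : Int) ≤ start + step * kB := by nlinarith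
        exact absurd hc.1 (by nlinarith [hbad])
      · have hkhigt : khi < (k : Int) := by omega
        have := (hkhi' (k : Int)).not.mp (by omega)
        exact this (by nlinarith [hc.2])

-- ===== VERDICT (by name: the statement is the Claim_ definition above) =====
theorem snap_to_grid_spec : Claim_equal_snap_to_grid := by
  intro pos x_range y_range _ hpre
  unfold Spec_snap_to_grid snap_to_grid snap_to_grid_alt
  obtain ⟨hx, hy⟩ := hpre
  have ex := axis_eq pos.1 x_range.1 x_range.2.1 x_range.2.2 hx
  have ey := axis_eq pos.2 y_range.1 y_range.2.1 y_range.2.2 hy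
  simp only at ex ey ⊢
  rw [ex, ey]
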